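-- pv_equiv track=rewrite | github.com/Xiaohan-Q/j2p_migration | src/code_generater.py | format_code
-- ===== SOURCE A (Python) =====
-- def format_code(code: str) -> str:
--     """格式化代码"""
--     lines = code.split('\n')
--     formatted_lines = []
--     prev_blank = False
--
--     for line in lines:
--         is_blank = line.strip() == ''
--
--         if is_blank and prev_blank:
--             continue
--
--         formatted_lines.append(line)
--         prev_blank = is_blank
--
--     result = '\n'.join(formatted_lines)
--     if not result.endswith('\n'):
--         result += '\n'
--
--     return result
-- ===== SOURCE B (Python) =====
-- def format_code(code: str) -> str:
--     """格式化代码"""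
--     lines = code.split('\n')
--     # stage 1: group consecutive lines into runs of equal blankness
--     runs = []          # completed runs: (is_blank, [lines...])
--     cur_b, cur = False, []
--     for line in lines:
--         b = line.strip() == ''
--         if cur and b == cur_b:
--             cur.append(line)
--         else:
--             if cur:
--                 runs.append((cur_b, cur))
--             cur_b, cur = b, [line]
--     if cur:
--         runs.append((cur_b, cur))
--     # stage 2: a blank run contributes only its first line, a non-blank run all of them
--     kept = []
--     for b, group in runs:
--         kept.extend(group[:1] if b else group)
--     result = '\n'.join(kept)
--     return result if result.endswith('\n') else result + '\n'
-- ===== Notes on version B (the rewrite author's own statement) =====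
-- stated objective: alternative
-- what changed: A's single stateful scan with a prev_blank flag is replaced by a two-stage run-length decomposition: first the lines are grouped into maximal runs of equal blankness (an explicit groupby), then each blank run contributes only its first line and each non-blank run all its lines.
import Mathlib
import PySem

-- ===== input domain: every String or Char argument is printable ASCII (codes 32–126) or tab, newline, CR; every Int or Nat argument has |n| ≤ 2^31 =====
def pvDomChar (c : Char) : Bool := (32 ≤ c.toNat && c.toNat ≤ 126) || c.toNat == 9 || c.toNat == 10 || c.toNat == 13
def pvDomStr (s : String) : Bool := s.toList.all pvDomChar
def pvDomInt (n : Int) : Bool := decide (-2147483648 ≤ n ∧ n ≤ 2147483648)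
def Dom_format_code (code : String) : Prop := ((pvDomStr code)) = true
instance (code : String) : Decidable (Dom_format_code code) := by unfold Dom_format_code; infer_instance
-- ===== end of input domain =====

-- B replaces A's stateful prev_blank scan with a two-stage run-length decomposition
-- (group lines into runs of equal blankness, then emit first-of-blank-run / all-of-non-blank-run);
-- objective: alternative.

-- ===== PORT A =====
-- one step of A's loop body: state = (formatted_lines, prev_blank)
def fcAStep (acc : List (List Char) × Bool) (line : List Char) : List (List Char) × Bool :=
  let isBlank := PySem.Chars.strip line == []
  if isBlank && acc.2 then acc
  else (acc.1 ++ [line], isBlank)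

-- trailing-newline fix shared by both ports (same final two lines in A and B)
def fcFinish (result : List Char) : List Char :=
  if PySem.Chars.endswith result ['\n'] then result else result ++ ['\n']

def fcA (cs : List Char) : List Char :=
  fcFinish (PySem.Chars.join ['\n'] (((PySem.Chars.splitOn cs ['\n']).foldl fcAStep ([], false)).1))

def format_code (code : String) : String := String.ofList (fcA code.toList)

-- ===== PORT B =====
def fcBlank (l : List Char) : Bool := PySem.Chars.strip l == []

-- one step of B's grouping loop: state = (runs, cur_b, cur)
def fcStep (st : List (Bool × List (List Char)) × Bool × List (List Char)) (line : List Char) :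
    List (Bool × List (List Char)) × Bool × List (List Char) :=
  let b := fcBlank line
  if !st.2.2.isEmpty && (b == st.2.1) then
    (st.1, st.2.1, st.2.2 ++ [line])
  else
    ((if st.2.2.isEmpty then st.1 else st.1 ++ [(st.2.1, st.2.2)]), b, [line])

-- flush the trailing current run, as Python's final 'if cur: runs.append(...)'
def fcFinal (st : List (Bool × List (List Char)) × Bool × List (List Char)) :
    List (Bool × List (List Char)) :=
  if st.2.2.isEmpty then st.1 else st.1 ++ [(st.2.1, st.2.2)]

-- what one run contributes: 'group[:1] if b else group'
def fcEmit (r : Bool × List (List Char)) : List (List Char) :=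
  if r.1 then r.2.take 1 else r.2

def fcB (cs : List Char) : List Char :=
  fcFinish (PySem.Chars.join ['\n']
    ((fcFinal ((PySem.Chars.splitOn cs ['\n']).foldl fcStep ([], false, []))).foldl
      (fun acc r => acc ++ fcEmit r) []))

def format_code_alt (code : String) : String := String.ofList (fcB code.toList)

-- ===== PRECONDITION & SPEC =====
def Spec_format_code (code : String) (out : String) : Prop := out = format_code_alt code
instance (code : String) (out : String) : Decidable (Spec_format_code code out) := by unfold Spec_format_code; infer_instance

-- ===== CLAIM (what is proved, stated in full; the proofs are below) =====
def Claim_equal_format_code : Prop := ∀ (code : String), Dom_format_code code → Spec_format_code code (format_code code)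

-- ===== LEMMAS AND PROOFS =====

-- the list A's loop keeps, as a recursion on the lines with the prev_blank flag
def keepFrom (prev : Bool) : List (List Char) → List (List Char)
  | [] => []
  | l :: ls =>
      if fcBlank l && prev then keepFrom prev ls
      else l :: keepFrom (fcBlank l) ls

theorem foldl_fcAStep (lines : List (List Char)) :
    ∀ (acc : List (List Char)) (prev : Bool),
      (lines.foldl fcAStep (acc, prev)).1 = acc ++ keepFrom prev lines := by
  induction lines with
  | nil => intro acc prev; simp [keepFrom]
  | cons l ls ih =>
      intro acc prev
      rcases Bool.eq_false_or_eq_true (fcBlank l) with hb | hb <;>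
        rcases Bool.eq_false_or_eq_true prev with hp | hp <;>
        subst hp <;>
        simp only [fcBlank] at hb <;>
        simp [List.foldl_cons, fcAStep, keepFrom, fcBlank, hb, ih]

-- main invariant of B's grouping loop: with a non-empty current run, the flushed runs
-- flatMapped through fcEmit are the already-completed part, the current run's emission,
-- and A's keepFrom on the remaining lines (starting with the current run's blankness)
theorem fcStep_invariant (lines : List (List Char)) :
    ∀ (runs : List (Bool × List (List Char))) (cb : Bool) (cur : List (List Char)),
      cur ≠ [] →
      (fcFinal (lines.foldl fcStep (runs, cb, cur))).flatMap fcEmit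
        = runs.flatMap fcEmit ++ fcEmit (cb, cur) ++ keepFrom cb lines := by
  induction lines with
  | nil =>
      intro runs cb cur hcur
      simp [fcFinal, keepFrom, List.isEmpty_iff, hcur]
  | cons l ls ih =>
      intro runs cb cur hcur
      rw [List.foldl_cons]
      rcases Bool.eq_false_or_eq_true (fcBlank l) with hb | hb <;>
        rcases Bool.eq_false_or_eq_true cb with hcb | hcb <;> subst hcb
      · -- l blank, cb = true : extend blank run (first line of run unchanged)
        rw [show fcStep (runs, true, cur) l = (runs, true, cur ++ [l]) by
              simp [fcStep, hb, hcur]]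
        rw [ih _ _ _ (by simp)]
        rcases cur with _ | ⟨c, cs⟩
        · exact absurd rfl hcur
        · simp [fcEmit, keepFrom, hb]
      · -- l blank, cb = false : close non-blank run, start new blank run
        rw [show fcStep (runs, false, cur) l = (runs ++ [(false, cur)], fcBlank l, [l]) by
              simp [fcStep, hb, hcur]]
        rw [ih _ _ _ (by simp)]
        simp [fcEmit, keepFrom, hb]
      · -- l non-blank, cb = true : close blank run, start new non-blank run
        rw [show fcStep (runs, true, cur) l = (runs ++ [(true, cur)], fcBlank l, [l]) by
              simp [fcStep, hb, hcur]]
        rw [ih _ _ _ (by simp)]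
        simp [fcEmit, keepFrom, hb]
      · -- l non-blank, cb = false : extend current run
        rw [show fcStep (runs, false, cur) l = (runs, false, cur ++ [l]) by
              simp [fcStep, hb, hcur]]
        rw [ih _ _ _ (by simp)]
        simp [fcEmit, keepFrom, hb]

theorem runs_emit_eq_keepFrom (lines : List (List Char)) :
    (fcFinal (lines.foldl fcStep ([], false, []))).flatMap fcEmit = keepFrom false lines := by
  cases lines with
  | nil => simp [fcFinal, keepFrom]
  | cons l ls =>
      rw [List.foldl_cons,
          show fcStep ([], false, []) l = ([], fcBlank l, [l]) by simp [fcStep],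
          fcStep_invariant _ _ _ _ (by simp)]
      rcases Bool.eq_false_or_eq_true (fcBlank l) with hb | hb <;>
        simp [fcEmit, keepFrom, hb]

theorem fcA_eq_fcB (cs : List Char) : fcA cs = fcB cs := by
  unfold fcA fcB
  rw [foldl_fcAStep, PySem.List.foldl_append_eq_flatMap, runs_emit_eq_keepFrom]

-- ===== VERDICT (by name: the statement is the Claim_ definition above) =====
theorem format_code_spec : Claim_equal_format_code := by
  intro code _
  unfold Spec_format_code format_code format_code_alt
  rw [fcA_eq_fcB]
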